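-- pv_equiv track=rewrite | github.com/hakbailey/advent-of-code-2019 | day_8_part_2.py | map_layers
-- ===== SOURCE A (Python) =====
-- def map_layers(layers: dict) -> list:
--     image = [0 for x in range(150)]
--     for k, v in reversed(layers.items()):
--         for i, pixel in enumerate(list(v)):
--             if pixel == '2':
--                 pass
--             elif pixel == '0':
--                 image[i] = 0
--             elif pixel == '1':
--                 image[i] = 256
--     return image
-- ===== SOURCE B (Python) =====
-- def map_layers(layers: dict) -> list:
--     # Pixel-major: for each of the 150 positions, the first (top-most) layer
--     # with a '0' or '1' at that position decides the pixel; otherwise it stays 0.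
--     values = list(layers.values())
--     image = []
--     for i in range(150):
--         pixel = 0
--         for v in values:
--             if i < len(v):
--                 c = v[i]
--                 if c == '0':
--                     pixel = 0
--                     break
--                 elif c == '1':
--                     pixel = 256
--                     break
--         image.append(pixel)
--     return image
-- ===== Notes on version B (the rewrite author's own statement) =====
-- stated objective: alternative
-- what changed: Transposed the nested loops: instead of A's layer-major reverse iteration that overwrites image cells bottom-up, B iterates the 150 pixel positions and scans the layers front-to-back, stopping at the first opaque ('0'/'1') pixel, so no cell is ever overwritten.
import Mathlib
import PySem

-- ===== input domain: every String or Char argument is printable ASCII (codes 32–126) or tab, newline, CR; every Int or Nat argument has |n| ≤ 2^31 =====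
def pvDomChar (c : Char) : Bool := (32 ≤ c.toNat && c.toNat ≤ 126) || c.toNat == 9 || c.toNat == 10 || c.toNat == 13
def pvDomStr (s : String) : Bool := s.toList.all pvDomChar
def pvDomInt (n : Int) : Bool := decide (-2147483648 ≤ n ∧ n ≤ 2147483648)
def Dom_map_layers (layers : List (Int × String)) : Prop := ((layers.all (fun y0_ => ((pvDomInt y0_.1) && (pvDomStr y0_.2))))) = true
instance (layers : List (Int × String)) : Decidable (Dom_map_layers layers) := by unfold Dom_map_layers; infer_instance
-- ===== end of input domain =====

-- B builds the image pixel-major (first opaque layer wins, no overwriting) instead of A's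
-- layer-major reverse overwrite; same cost, different decomposition.


-- ===== PORT A =====
-- inner 'for i, pixel in enumerate(list(v))' loop, carrying the running index
def pvApplyA : List Int → Nat → List Char → List Int
  | image, _, [] => image
  | image, i, c :: rest =>
      pvApplyA
        (if c = '2' then image
         else if c = '0' then image.set i 0
         else if c = '1' then image.set i 256
         else image) (i + 1) rest

def map_layers (layers : List (Int × String)) : List Int :=
  layers.reverse.foldl (fun image kv => pvApplyA image 0 kv.2.toList) (List.replicate 150 0)

-- ===== PORT B =====
-- inner 'for v in values' scan with break: first '0'/'1' at position i decides
def pvFirstPixel : List String → Nat → Int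
  | [], _ => 0
  | v :: rest, i =>
      match v.toList[i]? with
      | some c => if c = '0' then 0 else if c = '1' then 256 else pvFirstPixel rest i
      | none => pvFirstPixel rest i

def map_layers_alt (layers : List (Int × String)) : List Int :=
  (List.range 150).map (pvFirstPixel (layers.map Prod.snd))

-- ===== PRECONDITION & SPEC =====
-- Pre_ excludes exactly the inputs on which A raises IndexError: a layer string with an
-- opaque pixel ('0' or '1') at a position ≥ 150 makes A assign image[i] out of range.
def Pre_map_layers (layers : List (Int × String)) : Prop :=
  (layers.all (fun p => (p.2.toList.drop 150).all (fun c => !(c == '0' || c == '1')))) = true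
instance (layers : List (Int × String)) : Decidable (Pre_map_layers layers) := by
  unfold Pre_map_layers; infer_instance

def pvWitness_map_layers : (List (Int × String)) := [(7, "012012"), (8, "2")]

def Spec_map_layers (layers : List (Int × String)) (out : List Int) : Prop := out = map_layers_alt layers
instance (layers : List (Int × String)) (out : List Int) : Decidable (Spec_map_layers layers out) := by unfold Spec_map_layers; infer_instance

-- ===== CLAIM (what is proved, stated in full; the proofs are below) =====
def Claim_equal_map_layers : Prop := ∀ (layers : List (Int × String)), Dom_map_layers layers → Pre_map_layers layers → Spec_map_layers layers (map_layers layers)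

-- ===== LEMMAS AND PROOFS =====

theorem pre_iff (layers : List (Int × String)) :
    Pre_map_layers layers ↔
      ∀ p ∈ layers, ∀ c ∈ p.2.toList.drop 150, ¬(c = '0' ∨ c = '1') := by
  unfold Pre_map_layers
  simp [List.all_eq_true, not_or]

theorem pvApplyA_length (cs : List Char) : ∀ (image : List Int) (i : Nat),
    (pvApplyA image i cs).length = image.length := by
  induction cs with
  | nil => intro image i; rfl
  | cons c rest ih =>
      intro image i
      simp only [pvApplyA, ih]
      split_ifs <;> simp

theorem pvApplyA_get_lt (cs : List Char) : ∀ (image : List Int) (s i : Nat), i < s →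
    (pvApplyA image s cs)[i]? = image[i]? := by
  induction cs with
  | nil => intro image s i _; rfl
  | cons c rest ih =>
      intro image s i hi
      simp only [pvApplyA]
      rw [ih _ _ _ (Nat.lt_succ_of_lt hi)]
      split_ifs <;> simp [List.getElem?_set, Nat.ne_of_gt hi]

theorem pvApplyA_get_ge (cs : List Char) : ∀ (image : List Int) (s i : Nat), s ≤ i →
    (∀ j (h : j < cs.length), (cs[j] = '0' ∨ cs[j] = '1') → s + j < image.length) →
    (pvApplyA image s cs)[i]? =
      match cs[i - s]? with
      | some c => if c = '0' then some 0 else if c = '1' then some 256 else image[i]?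
      | none => image[i]? := by
  induction cs with
  | nil => intro image s i _ _; rfl
  | cons c rest ih =>
      intro image s i hs hbound
      simp only [pvApplyA]
      by_cases hi : i = s
      · subst hi
        rw [pvApplyA_get_lt _ _ _ _ (Nat.lt_succ_self i)]
        have h0 : (c :: rest)[i - i]? = some c := by simp
        rw [h0]
        by_cases hc0 : c = '0'
        · have hlen : i + 0 < image.length := hbound 0 (by simp) (by simp [hc0])
          subst hc0
          simp only [if_neg (by decide : ('0' : Char) ≠ '2'), if_pos rfl]
          simp [List.getElem?_set, Nat.lt_of_lt_of_le (by omega : i < i + 1) (by omega : i + 1 ≤ image.length)]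
        · by_cases hc1 : c = '1'
          · have hlen : i + 0 < image.length := hbound 0 (by simp) (by simp [hc1])
            subst hc1
            simp only [if_neg (by decide : ('1' : Char) ≠ '2'), if_neg (by decide : ('1' : Char) ≠ '0'), if_pos rfl]
            simp [List.getElem?_set, Nat.lt_of_lt_of_le (by omega : i < i + 1) (by omega : i + 1 ≤ image.length)]
          · simp only [if_neg hc0, if_neg hc1]
            split_ifs <;> rfl
      · have hs' : s + 1 ≤ i := by omega
        have hidx : (c :: rest)[i - s]? = rest[i - (s + 1)]? := by
          have : i - s = (i - (s + 1)) + 1 := by omega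
          rw [this]; simp
        rw [hidx]
        set image' := (if c = '2' then image
          else if c = '0' then image.set s 0
          else if c = '1' then image.set s 256
          else image) with himg
        have hlen' : image'.length = image.length := by
          rw [himg]; split_ifs <;> simp
        have hsi : s ≠ i := fun h => hi h.symm
        have hget' : image'[i]? = image[i]? := by
          rw [himg]; split_ifs <;> simp [List.getElem?_set, hsi]
        rw [ih image' (s + 1) i hs'
          (by intro j hj hcj
              rw [hlen']
              have := hbound (j + 1) (by simpa using Nat.succ_lt_succ hj) (by simpa using hcj)
              omega)]
        cases hrest : rest[i - (s + 1)]? with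
        | none => simpa using hget'
        | some d => simp only []; split_ifs <;> simp [hget']

theorem map_layers_cons (p : Int × String) (rest : List (Int × String)) :
    map_layers (p :: rest) = pvApplyA (map_layers rest) 0 p.2.toList := by
  simp [map_layers, List.reverse_cons, List.foldl_append]

theorem map_layers_length (layers : List (Int × String)) :
    (map_layers layers).length = 150 := by
  induction layers with
  | nil => rfl
  | cons p rest ih => rw [map_layers_cons, pvApplyA_length, ih]

set_option maxRecDepth 8000 in
theorem map_layers_get (layers : List (Int × String))
    (hpre : ∀ p ∈ layers, ∀ c ∈ p.2.toList.drop 150, ¬(c = '0' ∨ c = '1')) :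
    ∀ i, i < 150 → (map_layers layers)[i]? = some (pvFirstPixel (layers.map Prod.snd) i) := by
  induction layers with
  | nil =>
      intro i hi
      have h : map_layers [] = List.replicate 150 (0 : Int) := rfl
      rw [h, List.getElem?_replicate, if_pos hi]
      rfl
  | cons p rest ih =>
      intro i hi
      have hpre_rest := fun q hq => hpre q (List.mem_cons_of_mem _ hq)
      have hpre_p := hpre p (List.mem_cons_self)
      rw [map_layers_cons]
      rw [pvApplyA_get_ge _ _ _ _ (Nat.zero_le i)
        (by intro j hj hcj
            rw [map_layers_length]
            by_contra hge
            push_neg at hge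
            have hmem : p.2.toList[j] ∈ p.2.toList.drop 150 := by
              rw [List.mem_iff_getElem]
              refine ⟨j - 150, by rw [List.length_drop]; omega, ?_⟩
              rw [List.getElem_drop]
              congr 1; omega
            exact hpre_p _ hmem hcj)]
      have : i - 0 = i := Nat.sub_zero i
      rw [this]
      show _ = some (pvFirstPixel (p.2 :: rest.map Prod.snd) i)
      rw [pvFirstPixel]
      cases hc : p.2.toList[i]? with
      | none => simpa using ih hpre_rest i hi
      | some c =>
          simp only []
          split_ifs <;> simp [ih hpre_rest i hi]

-- ===== VERDICT (by name: the statement is the Claim_ definition above) =====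
set_option maxRecDepth 8000 in
theorem map_layers_spec : Claim_equal_map_layers := by
  intro layers _ hpre
  unfold Spec_map_layers
  apply List.ext_getElem?
  intro i
  by_cases hi : i < 150
  · rw [map_layers_get layers ((pre_iff layers).mp hpre) i hi]
    simp [map_layers_alt, List.getElem?_map, List.getElem?_range, hi]
  · have h1 : (map_layers layers)[i]? = none :=
      List.getElem?_eq_none (by rw [map_layers_length]; omega)
    have h2 : (map_layers_alt layers)[i]? = none :=
      List.getElem?_eq_none (by simp [map_layers_alt]; omega)
    rw [h1, h2]
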